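-- pv_equiv track=rewrite | github.com/vvrmahendra/DS-AlgoPrac | strings/equalStrings.py | solve
-- ===== SOURCE A (Python) =====
-- def solve(A, B):
--     from collections import defaultdict
--     dict_ = defaultdict(int)
--     for i in A:
--         dict_[i] += 1
--     for i in B:
--         dict_[i] += 1
--     for i in dict_:
--         if dict_[i]%2 == 1:
--             return 0
--     return 1
-- ===== SOURCE B (Python) =====
-- def solve(A, B):
--     s = sorted(A + B)
--     n = len(s)
--     i = 0
--     while n - i >= 2:
--         if s[i] != s[i + 1]:
--             return 0
--         i += 2
--     return 1 if i == n else 0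
-- ===== Notes on version B (the rewrite author's own statement) =====
-- stated objective: alternative
-- what changed: Sort-then-pair instead of counting: B sorts the concatenation A+B and recursively checks that it splits into adjacent equal pairs (every count even iff the sorted list pairs up), replacing A's count-dictionary build plus odd-count scan.
import Mathlib
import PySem

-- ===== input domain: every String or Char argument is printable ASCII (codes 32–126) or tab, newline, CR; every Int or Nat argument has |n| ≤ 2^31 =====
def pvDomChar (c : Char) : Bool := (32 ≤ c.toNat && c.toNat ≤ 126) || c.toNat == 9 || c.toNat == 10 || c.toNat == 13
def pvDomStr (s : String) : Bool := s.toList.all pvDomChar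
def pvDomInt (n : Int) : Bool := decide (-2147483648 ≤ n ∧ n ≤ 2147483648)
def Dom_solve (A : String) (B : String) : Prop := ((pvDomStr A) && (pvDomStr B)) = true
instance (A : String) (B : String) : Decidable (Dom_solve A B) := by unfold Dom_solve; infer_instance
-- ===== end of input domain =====

-- B sorts A+B and recursively checks it splits into adjacent equal pairs, instead of A's count-dictionary plus odd-count scan.


-- ===== PORT A =====
-- the final 'for i in dict_: if dict_[i]%2 == 1: return 0 / return 1' loop
def pvScan (d : PySem.Dict Char Int) : List Char → Int
  | [] => 1
  | i :: rest => if PySem.Int.mod (d.getD i 0) 2 == 1 then 0 else pvScan d rest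

def solve (A : String) (B : String) : Int :=
  let d := A.toList.foldl (fun d i => d.modify i 0 (fun x => x + 1)) PySem.Dict.empty
  let d := B.toList.foldl (fun d i => d.modify i 0 (fun x => x + 1)) d
  pvScan d d.keys

-- ===== PORT B =====
-- Source B's while loop over index i, rendered as structural recursion on the unprocessed suffix s[i:]
-- ([] ↔ i == n, [_] ↔ one char left, the two head elements ↔ s[i], s[i+1])
def pvPaired : List Char → Int
  | [] => 1
  | [_] => 0
  | x :: y :: rest => if x ≠ y then 0 else pvPaired rest

def solve_alt (A : String) (B : String) : Int :=
  pvPaired (PySem.List.sorted (A.toList ++ B.toList) (fun x => x) false)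

-- ===== PRECONDITION & SPEC =====
def Spec_solve (A : String) (B : String) (out : Int) : Prop := out = solve_alt A B
instance (A : String) (B : String) (out : Int) : Decidable (Spec_solve A B out) := by unfold Spec_solve; infer_instance

-- ===== CLAIM (what is proved, stated in full; the proofs are below) =====
def Claim_equal_solve : Prop := ∀ (A : String) (B : String), Dom_solve A B → Spec_solve A B (solve A B)

-- ===== LEMMAS AND PROOFS =====

-- keys of the counter dict contain exactly the characters seen so far
lemma contains_counter_foldl (L : List Char) (d : PySem.Dict Char Int) (c : Char) :
    (L.foldl (fun d i => d.modify i 0 (fun x => x + 1)) d).contains c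
      = (d.contains c || L.contains c) := by
  induction L generalizing d with
  | nil => simp
  | cons x L ih =>
      simp only [List.foldl_cons, ih, PySem.Dict.contains_modify, List.contains_cons]
      by_cases h : c = x <;> simp [h, Bool.or_comm, Bool.or_assoc, Bool.or_left_comm]

-- pvScan is 1 or 0, and 1 exactly when no listed key has an odd count
lemma pvScan_eq_one_iff (d : PySem.Dict Char Int) (ks : List Char) :
    pvScan d ks = 1 ↔ ∀ k ∈ ks, ¬ (PySem.Int.mod (d.getD k 0) 2 = 1) := by
  induction ks with
  | nil => simp [pvScan]
  | cons k ks ih =>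
      simp only [pvScan]
      split
      · rename_i h
        simp only [beq_iff_eq] at h
        constructor
        · intro h0; omega
        · intro hall; exact absurd h (hall k (by simp))
      · rename_i h
        simp only [beq_iff_eq] at h
        rw [ih]
        constructor
        · intro hall k' hk'
          rcases List.mem_cons.mp hk' with rfl | hm
          · exact h
          · exact hall k' hm
        · intro hall k' hk'; exact hall k' (by simp [hk'])

lemma pvScan_zero_or_one (d : PySem.Dict Char Int) (ks : List Char) :
    pvScan d ks = 0 ∨ pvScan d ks = 1 := by
  induction ks with
  | nil => simp [pvScan]
  | cons k ks ih =>
      simp only [pvScan]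
      split
      · exact Or.inl rfl
      · exact ih

lemma pvPaired_zero_or_one (s : List Char) : pvPaired s = 0 ∨ pvPaired s = 1 := by
  induction s using pvPaired.induct with
  | case1 => simp [pvPaired]
  | case2 => simp [pvPaired]
  | case3 x y rest hne => simp [pvPaired, hne]
  | case4 x y rest heq ih => simpa [pvPaired, heq] using ih

-- on a (≤)-sorted list, pairing up succeeds exactly when every character occurs an even number of times
lemma pvPaired_eq_one_iff (s : List Char) (hs : s.Pairwise (· ≤ ·)) :
    pvPaired s = 1 ↔ ∀ c, s.count c % 2 = 0 := by
  induction s using pvPaired.induct with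
  | case1 => simp [pvPaired]
  | case2 x =>
      simp only [pvPaired]
      constructor
      · intro h; omega
      · intro h; have := h x; simp [List.count_cons_self] at this
  | case3 x y rest hne =>
      have hxy : x ≤ y := (List.pairwise_cons.mp hs).1 y (by simp)
      have hyr : ∀ r ∈ rest, y ≤ r := fun r hr =>
        (List.pairwise_cons.mp (List.pairwise_cons.mp hs).2).1 r hr
      have hnr : x ∉ rest := fun hm => hne (le_antisymm hxy (hyr x hm))
      simp only [pvPaired, if_pos hne]
      constructor
      · intro h; exact absurd h (by norm_num)
      · intro h
        have hx := h x
        rw [List.count_cons_self, List.count_cons_of_ne (Ne.symm hne),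
            List.count_eq_zero.mpr hnr] at hx
        omega
  | case4 x y rest heq ih =>
      obtain rfl : x = y := not_not.mp heq
      have hrest : rest.Pairwise (· ≤ ·) :=
        (List.pairwise_cons.mp (List.pairwise_cons.mp hs).2).2
      simp only [pvPaired, ne_eq, not_true_eq_false, if_false, ih hrest]
      constructor
      · intro h c
        have hr := h c
        by_cases hc : x = c
        · simp only [List.count_cons, if_pos hc] at hr ⊢; omega
        · simp only [List.count_cons, if_neg hc] at hr ⊢; omega
      · intro h c
        have hr := h c
        by_cases hc : x = c
        · simp only [List.count_cons, if_pos hc] at hr ⊢; omega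
        · simp only [List.count_cons, if_neg hc] at hr ⊢; omega

-- ===== VERDICT (by name: the statement is the Claim_ definition above) =====
theorem solve_spec : Claim_equal_solve := by
  intro A B _
  unfold Spec_solve solve solve_alt
  simp only [← List.foldl_append]
  set L := A.toList ++ B.toList with hL
  set d := L.foldl (fun d i => d.modify i 0 (fun x => x + 1))
    (PySem.Dict.empty : PySem.Dict Char Int) with hd
  set ss := PySem.List.sorted L (fun x => x) false with hss
  have hgetD : ∀ c, d.getD c 0 = ((L.count c : Nat) : Int) := by
    intro c
    simpa using PySem.Dict.getD_foldl_modify_add_one L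
      (PySem.Dict.empty : PySem.Dict Char Int) c
  have hkeys : ∀ c, c ∈ d.keys ↔ c ∈ L := by
    intro c
    rw [← PySem.Dict.contains_iff_mem_keys, hd, contains_counter_foldl]
    simp
  have hperm : ss.Perm L := by
    rw [hss]; exact PySem.List.sorted_perm L (fun x => x) false
  have hpair : ss.Pairwise (· ≤ ·) := by
    simpa using PySem.List.sorted_pairwise (xs := L) (key := fun x => x)
  have hcount : ∀ c, ss.count c = L.count c := fun c => hperm.count_eq c
  have hmod : ∀ n : Nat, PySem.Int.mod (n : Int) 2 = ((n % 2 : Nat) : Int) := by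
    intro n; exact_mod_cast PySem.Int.mod_natCast n 2
  have hiff : pvScan d d.keys = 1 ↔ pvPaired ss = 1 := by
    rw [pvScan_eq_one_iff, pvPaired_eq_one_iff ss hpair]
    constructor
    · intro h c
      rw [hcount]
      by_cases hc : c ∈ L
      · have hk := h c ((hkeys c).mpr hc)
        rw [hgetD c, hmod] at hk
        omega
      · simp [List.count_eq_zero.mpr hc]
    · intro h k _
      rw [hgetD k, hmod]
      have hk := h k
      rw [hcount] at hk
      intro hbad
      have hodd : L.count k % 2 = 1 := by exact_mod_cast hbad
      omega
  rcases pvScan_zero_or_one d d.keys with h | h <;>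
    rcases pvPaired_zero_or_one ss with g | g
  · rw [h, g]
  · exact absurd (hiff.mpr g) (by rw [h]; norm_num)
  · exact absurd (hiff.mp h) (by rw [g]; norm_num)
  · rw [h, g]
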